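-- pv_equiv track=rewrite | github.com/Owain94/ISCRIP | Week3/GSMoniemen.py | T9
-- ===== SOURCE A (Python) =====
-- def T9(message: str) -> str:  # Function name should be lower case (PEP8 naming conventions)
--     """
--     Zet een bericht om naar de T9 variant van het bericht
--
--     :param message: Het bericht
--     :return: Een nummer reeks van de T9 variant
--     """
--     key = ''
--
--     for symbol in message.lower():
--         if symbol in 'abc':
--             key += '2'
--         if symbol in 'def':
--             key += '3'
--         if symbol in 'ghi':
--             key += '4'
--         if symbol in 'jkl':
--             key += '5'
--         if symbol in 'mno':
--             key += '6'
--         if symbol in 'pqrs':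
--             key += '7'
--         if symbol in 'tuv':
--             key += '8'
--         if symbol in 'wxyz':
--             key += '9'
--         if symbol == ' ':
--             key += '0'
--
--     return key
-- ===== SOURCE B (Python) =====
-- def T9(message: str) -> str:
--     # Arithmetic keypad formula: letter index k = ord(c)-97; the keypad groups are
--     # blocks of 3 except the 4-letter pqrs and wxyz blocks, so after dropping one
--     # slot past 's' (k>15 -> q..z shift) and one past 'y' (k>22), the digit is
--     # 2 + k//3.  Space is '0'; everything else contributes nothing.
--     out = []
--     for c in message.lower():
--         if c == ' ':
--             out.append('0')
--         elif 'a' <= c <= 'z':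
--             k = ord(c) - 97
--             out.append(chr(50 + (k - (k > 15) - (k > 22)) // 3))
--     return ''.join(out)
-- ===== Notes on version B (the rewrite author's own statement) =====
-- stated objective: alternative
-- what changed: Replaces A's nine membership-test branches with a closed-form arithmetic rule: keypad digit = chr(50 + (k - (k>15) - (k>22))//3) computed from the letter index k = ord(c)-97, with only a range check and the space case remaining.
import Mathlib
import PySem

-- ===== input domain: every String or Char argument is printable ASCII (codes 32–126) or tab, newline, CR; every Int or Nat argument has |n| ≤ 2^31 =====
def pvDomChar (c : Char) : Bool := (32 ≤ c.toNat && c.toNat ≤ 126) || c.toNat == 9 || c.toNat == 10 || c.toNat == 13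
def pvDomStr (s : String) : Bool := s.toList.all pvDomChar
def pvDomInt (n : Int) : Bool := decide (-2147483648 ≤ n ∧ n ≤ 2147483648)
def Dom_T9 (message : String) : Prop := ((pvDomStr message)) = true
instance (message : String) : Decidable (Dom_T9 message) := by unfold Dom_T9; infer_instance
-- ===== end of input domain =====

-- B replaces A's nine membership-test branches by a closed-form arithmetic digit formula on the letter index (alternative, same cost).

-- ===== PORT A =====
-- A: key = ''; for symbol in message.lower(): nine "if symbol in '<group>': key += '<digit>'" checks, then "if symbol == ' ': key += '0'".
def T9 (message : String) : String :=
  String.ofList ((PySem.Chars.lower message.toList).foldl (fun key symbol =>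
    let key := if symbol ∈ ['a', 'b', 'c'] then key ++ ['2'] else key
    let key := if symbol ∈ ['d', 'e', 'f'] then key ++ ['3'] else key
    let key := if symbol ∈ ['g', 'h', 'i'] then key ++ ['4'] else key
    let key := if symbol ∈ ['j', 'k', 'l'] then key ++ ['5'] else key
    let key := if symbol ∈ ['m', 'n', 'o'] then key ++ ['6'] else key
    let key := if symbol ∈ ['p', 'q', 'r', 's'] then key ++ ['7'] else key
    let key := if symbol ∈ ['t', 'u', 'v'] then key ++ ['8'] else key
    let key := if symbol ∈ ['w', 'x', 'y', 'z'] then key ++ ['9'] else key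
    let key := if symbol = ' ' then key ++ ['0'] else key
    key) [])

-- ===== PORT B =====
-- B: per character of the lowered message: space -> '0'; a..z -> chr(50 + (k - (k>15) - (k>22)) // 3) with k = ord(c)-97; else nothing.
def T9Digit (c : Char) : List Char :=
  if c = ' ' then ['0']
  else if 'a' ≤ c ∧ c ≤ 'z' then
    let k : Int := (c.toNat : Int) - 97
    [Char.ofNat (50 + PySem.Int.floordiv (k - (if k > 15 then 1 else 0) - (if k > 22 then 1 else 0)) 3).toNat]
  else []

def T9_alt (message : String) : String :=
  String.ofList ((PySem.Chars.lower message.toList).flatMap T9Digit)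

-- ===== PRECONDITION & SPEC =====
def Spec_T9 (message : String) (out : String) : Prop := out = T9_alt message
instance (message : String) (out : String) : Decidable (Spec_T9 message out) := by unfold Spec_T9; infer_instance

-- ===== CLAIM (what is proved, stated in full; the proofs are below) =====
def Claim_equal_T9 : Prop := ∀ (message : String), Dom_T9 message → Spec_T9 message (T9 message)

-- ===== LEMMAS AND PROOFS =====

-- per-character agreement: A's if-cascade appends exactly B's arithmetic digit for that character
set_option maxHeartbeats 4000000 in
lemma T9_step (key : List Char) (c : Char) :
    (let key := if c ∈ ['a', 'b', 'c'] then key ++ ['2'] else key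
     let key := if c ∈ ['d', 'e', 'f'] then key ++ ['3'] else key
     let key := if c ∈ ['g', 'h', 'i'] then key ++ ['4'] else key
     let key := if c ∈ ['j', 'k', 'l'] then key ++ ['5'] else key
     let key := if c ∈ ['m', 'n', 'o'] then key ++ ['6'] else key
     let key := if c ∈ ['p', 'q', 'r', 's'] then key ++ ['7'] else key
     let key := if c ∈ ['t', 'u', 'v'] then key ++ ['8'] else key
     let key := if c ∈ ['w', 'x', 'y', 'z'] then key ++ ['9'] else key
     let key := if c = ' ' then key ++ ['0'] else key
     key) = key ++ T9Digit c := by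
  by_cases hsp : c = ' '
  · subst hsp; simp [T9Digit]
  by_cases hl : 'a' ≤ c ∧ c ≤ 'z'
  · have h1 : 97 ≤ c.toNat := Char.le_def.mp hl.1
    have h2 : c.toNat ≤ 122 := Char.le_def.mp hl.2
    interval_cases h : c.toNat <;>
      (have hc : c = Char.ofNat c.toNat := (Char.ofNat_toNat c).symm) <;> rw [h] at hc <;>
      subst hc <;> simp [T9Digit]
  · have m1 : c ∉ ['a', 'b', 'c'] := fun h => hl (by fin_cases h <;> exact ⟨by decide, by decide⟩)
    have m2 : c ∉ ['d', 'e', 'f'] := fun h => hl (by fin_cases h <;> exact ⟨by decide, by decide⟩)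
    have m3 : c ∉ ['g', 'h', 'i'] := fun h => hl (by fin_cases h <;> exact ⟨by decide, by decide⟩)
    have m4 : c ∉ ['j', 'k', 'l'] := fun h => hl (by fin_cases h <;> exact ⟨by decide, by decide⟩)
    have m5 : c ∉ ['m', 'n', 'o'] := fun h => hl (by fin_cases h <;> exact ⟨by decide, by decide⟩)
    have m6 : c ∉ ['p', 'q', 'r', 's'] := fun h => hl (by fin_cases h <;> exact ⟨by decide, by decide⟩)
    have m7 : c ∉ ['t', 'u', 'v'] := fun h => hl (by fin_cases h <;> exact ⟨by decide, by decide⟩)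
    have m8 : c ∉ ['w', 'x', 'y', 'z'] := fun h => hl (by fin_cases h <;> exact ⟨by decide, by decide⟩)
    simp [T9Digit, m1, m2, m3, m4, m5, m6, m7, m8, hsp, hl]

-- lifting the per-character fact through A's fold
lemma T9_fold (l : List Char) (acc : List Char) :
    l.foldl (fun key symbol =>
      let key := if symbol ∈ ['a', 'b', 'c'] then key ++ ['2'] else key
      let key := if symbol ∈ ['d', 'e', 'f'] then key ++ ['3'] else key
      let key := if symbol ∈ ['g', 'h', 'i'] then key ++ ['4'] else key
      let key := if symbol ∈ ['j', 'k', 'l'] then key ++ ['5'] else key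
      let key := if symbol ∈ ['m', 'n', 'o'] then key ++ ['6'] else key
      let key := if symbol ∈ ['p', 'q', 'r', 's'] then key ++ ['7'] else key
      let key := if symbol ∈ ['t', 'u', 'v'] then key ++ ['8'] else key
      let key := if symbol ∈ ['w', 'x', 'y', 'z'] then key ++ ['9'] else key
      let key := if symbol = ' ' then key ++ ['0'] else key
      key) acc
    = acc ++ l.flatMap T9Digit := by
  induction l generalizing acc with
  | nil => simp
  | cons c l ih => rw [List.foldl_cons, ih, T9_step, List.flatMap_cons, List.append_assoc]

-- ===== VERDICT (by name: the statement is the Claim_ definition above) =====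
theorem T9_spec : Claim_equal_T9 := by
  intro message _
  unfold Spec_T9 T9 T9_alt
  rw [T9_fold]
  simp
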